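-- pv_equiv track=rewrite | github.com/IanQS/that_2022 | 1_monoids/sol/day_1.py | mdc_processor
-- ===== SOURCE A (Python) =====
-- def mdc_processor(ihm_results):
--     if not ihm_results:
--         return None
--     accumulated_gradient = None
--     num_valids = 0
--     ihm_time_tracker = []
--     counter = 0
--     for i, result in enumerate(ihm_results):
--         if result is None:
--             continue
--         num_valids += 1
--         counter += 1
--         curr_grad, curr_time = result
--         if accumulated_gradient is None:
--             accumulated_gradient = curr_grad
--         else:
--             accumulated_gradient += curr_grad
--         ihm_time_tracker.append(curr_time)
--     num_houses_serviced = len(ihm_results)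
--     num_IHMs_failed = num_houses_serviced - num_valids
--     # Requirement 2 and 3
--     return accumulated_gradient, num_houses_serviced, num_IHMs_failed, ihm_time_tracker
-- ===== SOURCE B (Python) =====
-- def mdc_processor(ihm_results):
--     if not ihm_results:
--         return None
--     g, v, ts = _reduce(ihm_results, 0, len(ihm_results))
--     n = len(ihm_results)
--     return g, n, n - v, ts
--
--
-- def _reduce(rs, lo, hi):
--     # divide-and-conquer monoidal reduction over rs[lo:hi] (hi - lo >= 1)
--     if hi - lo == 1:
--         r = rs[lo]
--         if r is None:
--             return None, 0, []
--         g, t = r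
--         return g, 1, [t]
--     mid = (lo + hi) // 2
--     g1, v1, t1 = _reduce(rs, lo, mid)
--     g2, v2, t2 = _reduce(rs, mid, hi)
--     if g1 is None:
--         g = g2
--     elif g2 is None:
--         g = g1
--     else:
--         g = g1 + g2
--     return g, v1 + v2, t1 + t2
-- ===== Notes on version B (the rewrite author's own statement) =====
-- stated objective: alternative
-- what changed: Replaces the linear stateful scan with a divide-and-conquer monoidal reduction: the list is split recursively in half and the (gradient-option, valid-count, times) triples of the two halves are merged; correct because integer addition and list concatenation are associative.
import Mathlib
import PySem

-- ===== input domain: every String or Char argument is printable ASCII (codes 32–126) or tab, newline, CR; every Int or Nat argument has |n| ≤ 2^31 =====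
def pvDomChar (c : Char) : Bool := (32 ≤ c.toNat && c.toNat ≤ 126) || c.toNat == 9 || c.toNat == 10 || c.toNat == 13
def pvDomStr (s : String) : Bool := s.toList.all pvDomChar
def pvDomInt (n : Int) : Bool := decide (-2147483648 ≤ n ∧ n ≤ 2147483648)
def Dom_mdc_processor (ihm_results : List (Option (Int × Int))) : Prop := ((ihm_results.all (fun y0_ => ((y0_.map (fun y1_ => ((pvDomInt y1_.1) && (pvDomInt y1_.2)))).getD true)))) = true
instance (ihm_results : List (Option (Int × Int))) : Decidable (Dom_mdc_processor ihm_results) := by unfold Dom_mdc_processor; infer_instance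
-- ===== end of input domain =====

-- B replaces A's single stateful scan with a divide-and-conquer monoidal reduction over halves; same results by associativity, similar cost.


-- ===== PORT A =====
-- A's loop body (enumerate's index i is unused; num_valids and counter both count the valids, ported as two state fields)
def mdcStepA (st : Option Int × Int × Int × List Int) (r : Option (Int × Int)) :
    Option Int × Int × Int × List Int :=
  match r with
  | none => st
  | some (curr_grad, curr_time) =>
      ((match st.1 with
        | none => some curr_grad
        | some a => some (a + curr_grad)),
       st.2.1 + 1, st.2.2.1 + 1, st.2.2.2 ++ [curr_time])

def mdc_processor (ihm_results : List (Option (Int × Int))) : Option (Option Int × Int × Int × List Int) :=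
  if ihm_results = [] then none
  else
    let st := ihm_results.foldl mdcStepA (none, 0, 0, [])
    let num_houses_serviced : Int := ihm_results.length
    let num_IHMs_failed : Int := num_houses_serviced - st.2.1
    some (st.1, num_houses_serviced, num_IHMs_failed, st.2.2.2)

-- ===== PORT B =====
-- Source B's merge of the two optional gradients (the if/elif/else chain)
def mdcMergeG (g1 g2 : Option Int) : Option Int :=
  match g1, g2 with
  | none, g => g
  | g, none => g
  | some a, some b => some (a + b)

-- Source B's _reduce: divide-and-conquer over rs[lo:hi]; the 'hi ≤ lo' branch is a totality
-- guard only (Source B's _reduce is never called with an empty segment)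
def mdcReduce (rs : List (Option (Int × Int))) (lo hi : Nat) : Option Int × Int × List Int :=
  if hi ≤ lo then (none, 0, [])
  else if hi - lo = 1 then
    match rs.getD lo none with
    | none => (none, 0, [])
    | some (g, t) => (some g, 1, [t])
  else
    let r1 := mdcReduce rs lo ((lo + hi) / 2)
    let r2 := mdcReduce rs ((lo + hi) / 2) hi
    (mdcMergeG r1.1 r2.1, r1.2.1 + r2.2.1, r1.2.2 ++ r2.2.2)
termination_by hi - lo
decreasing_by all_goals omega

def mdc_processor_alt (ihm_results : List (Option (Int × Int))) : Option (Option Int × Int × Int × List Int) :=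
  if ihm_results = [] then none
  else
    let r := mdcReduce ihm_results 0 ihm_results.length
    let n : Int := ihm_results.length
    some (r.1, n, n - r.2.1, r.2.2)

-- ===== PRECONDITION & SPEC =====
def Spec_mdc_processor (ihm_results : List (Option (Int × Int))) (out : Option (Option Int × Int × Int × List Int)) : Prop := out = mdc_processor_alt ihm_results
instance (ihm_results : List (Option (Int × Int))) (out : Option (Option Int × Int × Int × List Int)) : Decidable (Spec_mdc_processor ihm_results out) := by unfold Spec_mdc_processor; infer_instance

-- ===== CLAIM (what is proved, stated in full; the proofs are below) =====
def Claim_equal_mdc_processor : Prop := ∀ (ihm_results : List (Option (Int × Int))), Dom_mdc_processor ihm_results → Spec_mdc_processor ihm_results (mdc_processor ihm_results)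

-- ===== LEMMAS AND PROOFS =====

-- gradient accumulation over the valids (A's accumulator), starting from an optional accumulator
def gAcc (a : Option Int) (l : List Int) : Option Int :=
  l.foldl (fun a g => match a with | none => some g | some x => some (x + g)) a

-- the same value, written as Source B's base/merge recursion would produce it
def gSum (l : List Int) : Option Int :=
  match l with
  | [] => none
  | g :: gs => some (gs.foldl (· + ·) g)

lemma gAcc_some (a : Int) (l : List Int) : gAcc (some a) l = some (l.foldl (· + ·) a) := by
  induction l generalizing a with
  | nil => rfl
  | cons g gs ih => simp [gAcc, List.foldl] at ih ⊢; exact ih _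

lemma gAcc_none (l : List Int) : gAcc none l = gSum l := by
  cases l with
  | nil => rfl
  | cons g gs => simpa [gAcc, gSum, List.foldl] using gAcc_some g gs

lemma foldl_add_shift (a b : Int) (l : List Int) :
    l.foldl (· + ·) (a + b) = a + l.foldl (· + ·) b := by
  induction l generalizing b with
  | nil => rfl
  | cons x xs ih => simp [List.foldl, add_assoc, ih]

lemma gSum_append (l1 l2 : List Int) : gSum (l1 ++ l2) = mdcMergeG (gSum l1) (gSum l2) := by
  cases l1 with
  | nil => rw [List.nil_append]; cases l2 <;> simp [gSum, mdcMergeG]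
  | cons g gs =>
    cases l2 with
    | nil => simp [gSum, mdcMergeG]
    | cons h hs =>
      simp [gSum, mdcMergeG, List.foldl_append, List.foldl]
      rw [← foldl_add_shift]

-- A's loop, characterised over the filtered valids
lemma foldl_stepA (xs : List (Option (Int × Int))) (a : Option Int) (nv c : Int) (ts : List Int) :
    xs.foldl mdcStepA (a, nv, c, ts) =
      (gAcc a ((xs.filterMap id).map Prod.fst),
       nv + (xs.filterMap id).length,
       c + (xs.filterMap id).length,
       ts ++ (xs.filterMap id).map Prod.snd) := by
  induction xs generalizing a nv c ts with
  | nil => simp [gAcc]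
  | cons x xs ih =>
    cases x with
    | none => simpa [mdcStepA] using ih a nv c ts
    | some p =>
      obtain ⟨g, t⟩ := p
      cases a with
      | none =>
        simp [mdcStepA, List.foldl, ih (some g) (nv + 1) (c + 1) (ts ++ [t]), gAcc]
        omega
      | some v =>
        simp [mdcStepA, List.foldl, ih (some (v + g)) (nv + 1) (c + 1) (ts ++ [t]), gAcc]
        omega

-- B's recursion, characterised over the filtered valids of the segment rs[lo:hi]
lemma mdcReduce_eq (rs : List (Option (Int × Int))) :
    ∀ (k lo hi : Nat), hi - lo = k → lo < hi → hi ≤ rs.length →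
    mdcReduce rs lo hi =
      (gSum ((((rs.drop lo).take (hi - lo)).filterMap id).map Prod.fst),
       ((((rs.drop lo).take (hi - lo)).filterMap id).length : Int),
       (((rs.drop lo).take (hi - lo)).filterMap id).map Prod.snd) := by
  intro k
  induction k using Nat.strong_induction_on with
  | _ k ih =>
    intro lo hi hk hlt hle
    rcases Nat.lt_or_ge (hi - lo) 2 with hsmall | hbig
    · -- hi - lo = 1
      have h1 : hi - lo = 1 := by omega
      have hlo : lo < rs.length := by omega
      have hdrop : rs.drop lo = rs[lo] :: rs.drop (lo + 1) := List.drop_eq_getElem_cons hlo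
      rw [mdcReduce, if_neg (by omega), if_pos h1]
      have hget : rs.getD lo none = rs[lo] := List.getD_eq_getElem rs none hlo
      rw [hget, h1, hdrop]
      cases h : rs[lo] with
      | none => simp [gSum]
      | some p => cases p with | mk g t => simp [gSum]
    · -- split at mid
      have hm1 : lo < (lo + hi) / 2 := by omega
      have hm2 : (lo + hi) / 2 < hi := by omega
      rw [mdcReduce, if_neg (by omega), if_neg (by omega)]
      rw [ih ((lo + hi) / 2 - lo) (by omega) lo ((lo + hi) / 2) rfl hm1 (by omega),
          ih (hi - (lo + hi) / 2) (by omega) ((lo + hi) / 2) hi rfl hm2 hle]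
      have hsplit : (rs.drop lo).take (hi - lo) =
          (rs.drop lo).take ((lo + hi) / 2 - lo) ++
          ((rs.drop ((lo + hi) / 2)).take (hi - (lo + hi) / 2)) := by
        have : rs.drop ((lo + hi) / 2) = (rs.drop lo).drop ((lo + hi) / 2 - lo) := by
          rw [List.drop_drop]; congr 1; omega
        rw [this, ← List.take_add]
        congr 1; omega
      rw [hsplit]
      simp [List.filterMap_append, gSum_append]

-- ===== VERDICT (by name: the statement is the Claim_ definition above) =====
theorem mdc_processor_spec : Claim_equal_mdc_processor := by
  intro xs _
  unfold Spec_mdc_processor mdc_processor mdc_processor_alt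
  cases hxs : xs with
  | nil => simp
  | cons x rest =>
    simp only [reduceCtorEq, if_false]
    rw [foldl_stepA,
        mdcReduce_eq (x :: rest) ((x :: rest).length - 0) 0 (x :: rest).length rfl
          (by simp) (le_refl _)]
    simp [gAcc_none]
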